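-- pv_equiv track=rewrite | github.com/ikumen/today-i-learned | src/main/python/coding_problems/bs_permute_to_make_list_larger.py | solve
-- ===== SOURCE A (Python) =====
-- def solve(a, b):
--     a.sort()
--     b.sort()
--
--     rv = 0
--     ai = bi = len(a)-1
--     while ai >= 0 and bi >= 0:
--         if a[ai] > b[bi]:
--             ai -= 1
--             bi -= 1
--             rv += 1
--         else:
--             bi -= 1
--     return rv
-- ===== SOURCE B (Python) =====
-- def solve(a, b):
--     # Binary search on the answer: the result is the largest k such that the
--     # top k elements of sorted a pairwise beat the bottom k elements of sorted b
--     # (that predicate is monotone in k).  Same in-place sorts as A.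
--     a.sort()
--     b.sort()
--     n = len(a)
--
--     def good(k):
--         return all(a[n - k + i] > b[i] for i in range(k))
--
--     lo, hi = 0, n
--     while lo < hi:
--         mid = (lo + hi + 1) // 2
--         if good(mid):
--             lo = mid
--         else:
--             hi = mid - 1
--     return lo
-- ===== Notes on version B (the rewrite author's own statement) =====
-- stated objective: alternative
-- what changed: Replaces A's backward two-pointer linear greedy with a binary search on the answer k, using a verification predicate 'the top k of sorted a pairwise beat the bottom k of sorted b' (monotone in k).
import Mathlib
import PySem

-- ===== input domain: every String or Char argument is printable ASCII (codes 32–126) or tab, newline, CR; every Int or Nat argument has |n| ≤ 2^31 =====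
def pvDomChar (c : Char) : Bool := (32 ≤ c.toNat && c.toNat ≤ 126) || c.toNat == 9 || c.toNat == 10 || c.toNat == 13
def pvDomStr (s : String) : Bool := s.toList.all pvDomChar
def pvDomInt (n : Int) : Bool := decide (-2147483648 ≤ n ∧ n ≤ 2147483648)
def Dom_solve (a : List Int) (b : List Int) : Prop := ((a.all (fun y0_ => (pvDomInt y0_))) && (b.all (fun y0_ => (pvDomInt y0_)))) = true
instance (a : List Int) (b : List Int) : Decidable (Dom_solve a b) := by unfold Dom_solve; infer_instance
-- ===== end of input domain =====

-- B replaces A's backward two-pointer greedy by a binary search on the answer k with the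
-- verification predicate "the top k of sorted a pairwise beat the bottom k of sorted b";
-- equivalence is about return values only: both Pythons sort a and b in place identically.

-- ===== PORT A =====
-- A's while loop; pyGetD is exact where the Python indexing succeeds (Pre_solve ensures
-- every access is in range; outside Pre_solve Python raises IndexError).
def solveLoopA (sa sb : List Int) (ai bi rv : Int) : Int :=
  if 0 ≤ ai ∧ 0 ≤ bi then
    if PySem.List.pyGetD sb bi 0 < PySem.List.pyGetD sa ai 0 then
      solveLoopA sa sb (ai - 1) (bi - 1) (rv + 1)
    else
      solveLoopA sa sb ai (bi - 1) rv
  else rv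
termination_by (bi + 1).toNat
decreasing_by all_goals omega

def solve (a : List Int) (b : List Int) : Int :=
  let sa := PySem.List.sorted a (fun x => x) false
  let sb := PySem.List.sorted b (fun x => x) false
  solveLoopA sa sb ((a.length : Int) - 1) ((a.length : Int) - 1) 0

-- ===== PORT B =====
-- good(k) of Source B: all(a[n-k+i] > b[i] for i in range(k)); pyGetD is exact since inside
-- Pre_solve the binary search only asks 0 ≤ mid ≤ n ≤ len(b), keeping every access in range.
def goodB (sa sb : List Int) (n : Int) (k : Int) : Bool :=
  (PySem.List.pyRange 0 k 1).all
    (fun i => PySem.List.pyGetD sb i 0 < PySem.List.pyGetD sa (n - k + i) 0)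

-- midpoint bounds, cited by bsLoop's decreasing_by
theorem pvMid_bounds (lo hi : Int) (h : lo < hi) :
    lo < PySem.Int.floordiv (lo + hi + 1) 2 ∧ PySem.Int.floordiv (lo + hi + 1) 2 ≤ hi := by
  rw [PySem.Int.floordiv_eq_ediv_of_pos (by omega)]
  omega

-- Source B's while loop: lo, hi = 0, n; mid = (lo+hi+1)//2; keep the good half.
def bsLoop (sa sb : List Int) (n : Int) (lo hi : Int) : Int :=
  if h : lo < hi then
    if goodB sa sb n (PySem.Int.floordiv (lo + hi + 1) 2) then
      bsLoop sa sb n (PySem.Int.floordiv (lo + hi + 1) 2) hi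
    else
      bsLoop sa sb n lo (PySem.Int.floordiv (lo + hi + 1) 2 - 1)
  else lo
termination_by (hi - lo).toNat
decreasing_by
  · have := pvMid_bounds lo hi h; omega
  · have := pvMid_bounds lo hi h; omega

def solve_alt (a : List Int) (b : List Int) : Int :=
  let sa := PySem.List.sorted a (fun x => x) false
  let sb := PySem.List.sorted b (fun x => x) false
  bsLoop sa sb (a.length : Int) 0 (a.length : Int)

-- ===== PRECONDITION & SPEC =====
-- Pre_solve excludes exactly the inputs on which A raises IndexError: when len(b) < len(a)
-- and a is non-empty, A reads b[len(a)-1] out of range on its first iteration.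
def Pre_solve (a : List Int) (b : List Int) : Prop := a.length ≤ b.length
instance (a : List Int) (b : List Int) : Decidable (Pre_solve a b) := by unfold Pre_solve; infer_instance
def pvWitness_solve : List Int × List Int := ([3, 1], [2, 0, 4])

def Spec_solve (a : List Int) (b : List Int) (out : Int) : Prop := out = solve_alt a b
instance (a : List Int) (b : List Int) (out : Int) : Decidable (Spec_solve a b out) := by unfold Spec_solve; infer_instance

-- ===== CLAIM (what is proved, stated in full; the proofs are below) =====
def Claim_equal_solve : Prop := ∀ (a : List Int) (b : List Int), Dom_solve a b → Pre_solve a b → Spec_solve a b (solve a b)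

-- ===== LEMMAS AND PROOFS =====

-- Int-valued model of A's loop seen from the left: lists descending sorted.
def descM : List Int → List Int → Int
  | [], _ => 0
  | _ :: _, [] => 0
  | x :: xs, y :: ys => if y < x then 1 + descM xs ys else descM (x :: xs) ys
termination_by xs ys => xs.length + ys.length

theorem descM_nil_right (xs : List Int) : descM xs [] = 0 := by
  cases xs <;> simp [descM]

-- Nat twin of descM.
def descN : List Int → List Int → Nat
  | [], _ => 0
  | _ :: _, [] => 0
  | x :: xs, y :: ys => if y < x then 1 + descN xs ys else descN (x :: xs) ys
termination_by xs ys => xs.length + ys.length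

theorem descM_eq_descN : ∀ (xs ys : List Int), descM xs ys = (descN xs ys : Int) := by
  intro xs ys
  induction xs, ys using descN.induct with
  | case1 ys => simp [descM, descN]
  | case2 x xs => simp [descM, descN]
  | case3 x xs y ys h ih => simp [descM, descN, h, ih]
  | case4 x xs y ys h ih => simp [descM, descN, h, ih]

-- "k pairs are feasible" for DESCENDING lists: the first k of xs beat the last k of ys.
def goodD (xs ys : List Int) (k : Nat) : Prop :=
  k ≤ xs.length ∧ k ≤ ys.length ∧ ∀ j < k, ys.getD (ys.length - k + j) 0 < xs.getD j 0

-- on a descending list, later entries are ≤ earlier ones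
theorem getD_anti (l : List Int) (h : l.Pairwise (fun a b => b ≤ a)) (i j : Nat)
    (hij : i ≤ j) (hj : j < l.length) : l.getD j 0 ≤ l.getD i 0 := by
  rcases Nat.eq_or_lt_of_le hij with rfl | hlt
  · exact le_refl _
  · rw [List.getD_eq_getElem _ _ hj, List.getD_eq_getElem _ _ (by omega)]
    exact List.pairwise_iff_getElem.mp h i j (by omega) hj hlt

-- on an ascending list, earlier entries are ≤ later ones
theorem getD_mono (l : List Int) (h : l.Pairwise (fun a b => a ≤ b)) (i j : Nat)
    (hij : i ≤ j) (hj : j < l.length) : l.getD i 0 ≤ l.getD j 0 := by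
  rcases Nat.eq_or_lt_of_le hij with rfl | hlt
  · exact le_refl _
  · rw [List.getD_eq_getElem _ _ hj, List.getD_eq_getElem _ _ (by omega)]
    exact List.pairwise_iff_getElem.mp h i j (by omega) hj hlt

-- achievability: the greedy count is feasible
theorem descN_goodD : ∀ (xs ys : List Int), xs.Pairwise (fun a b => b ≤ a) →
    ys.Pairwise (fun a b => b ≤ a) → goodD xs ys (descN xs ys) := by
  intro xs ys
  induction xs, ys using descN.induct with
  | case1 ys => intro _ _; exact ⟨by simp [descN], by simp [descN], by simp [descN]⟩
  | case2 x xs => intro _ _; exact ⟨by simp [descN], by simp [descN], by simp [descN]⟩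
  | case3 x xs y ys h ih =>
    intro hxs hys
    obtain ⟨h1, h2, h3⟩ := ih (List.Pairwise.of_cons hxs) (List.Pairwise.of_cons hys)
    refine ⟨?_, ?_, ?_⟩
    · simp [descN, h]; omega
    · simp [descN, h]; omega
    · intro j hj
      simp only [descN, if_pos h] at hj ⊢
      set r := descN xs ys with hr
      cases j with
      | zero =>
        -- (y::ys).getD (|ys|-r) ≤ y < x
        have hle : (y :: ys).getD ((y :: ys).length - (1 + r) + 0) 0 ≤ (y :: ys).getD 0 0 :=
          getD_anti _ hys 0 _ (Nat.zero_le _) (by simp)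
        have hz : (y :: ys).getD 0 0 = y := rfl
        have hx : (x :: xs).getD 0 0 = x := rfl
        rw [hx]
        rw [hz] at hle
        omega
      | succ j' =>
        have hj' : j' < r := by omega
        have hidx : (y :: ys).length - (1 + r) + (j' + 1) = (ys.length - r + j') + 1 := by
          simp; omega
        rw [hidx]
        simp only [List.getD_cons_succ]
        exact h3 j' hj'
  | case4 x xs y ys h ih =>
    intro hxs hys
    obtain ⟨h1, h2, h3⟩ := ih hxs (List.Pairwise.of_cons hys)
    refine ⟨?_, ?_, ?_⟩
    · simpa [descN, h] using h1
    · simp [descN, h]; omega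
    · intro j hj
      simp only [descN, if_neg h] at hj ⊢
      set r := descN (x :: xs) ys with hr
      have hidx : (y :: ys).length - r + j = (ys.length - r + j) + 1 := by
        simp; omega
      rw [hidx]
      simp only [List.getD_cons_succ]
      exact h3 j hj

-- maximality: no feasible k exceeds the greedy count
theorem descN_max : ∀ (xs ys : List Int), xs.Pairwise (fun a b => b ≤ a) →
    ys.Pairwise (fun a b => b ≤ a) → ∀ k, goodD xs ys k → k ≤ descN xs ys := by
  intro xs ys
  induction xs, ys using descN.induct with
  | case1 ys => intro _ _ k hk; have := hk.1; simpa [descN] using this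
  | case2 x xs => intro _ _ k hk; have := hk.2.1; simpa [descN] using this
  | case3 x xs y ys h ih =>
    intro hxs hys k hk
    obtain ⟨h1, h2, h3⟩ := hk
    simp only [descN, if_pos h]
    cases k with
    | zero => omega
    | succ k' =>
      have hk' : goodD xs ys k' := by
        refine ⟨by simp at h1; omega, by simp at h2; omega, ?_⟩
        intro j hj
        have := h3 (j + 1) (by omega)
        have hidx : (y :: ys).length - (k' + 1) + (j + 1) = (ys.length - k' + j) + 1 := by
          simp at h2 ⊢; omega
        rw [hidx] at this
        simpa using this
      have := ih (List.Pairwise.of_cons hxs) (List.Pairwise.of_cons hys) k' hk'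
      omega
  | case4 x xs y ys h ih =>
    intro hxs hys k hk
    obtain ⟨h1, h2, h3⟩ := hk
    simp only [descN, if_neg h]
    have hky : k ≤ ys.length := by
      by_contra hc
      have hkeq : k = ys.length + 1 := by simp at h2; omega
      have := h3 0 (by omega)
      rw [hkeq] at this
      simp at this
      omega
    refine ih hxs (List.Pairwise.of_cons hys) k ⟨h1, hky, ?_⟩
    intro j hj
    have := h3 j hj
    have hidx : (y :: ys).length - k + j = (ys.length - k + j) + 1 := by
      simp; omega
    rw [hidx] at this
    simpa using this

-- A's index loop equals descM over the reversed prefixes.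
theorem solveLoopA_eq (sa sb : List Int) : ∀ (j i : Nat) (rv : Int), i ≤ sa.length → j ≤ sb.length →
    solveLoopA sa sb ((i : Int) - 1) ((j : Int) - 1) rv =
      rv + descM (sa.take i).reverse (sb.take j).reverse := by
  intro j
  induction j with
  | zero =>
    intro i rv _ _
    rw [solveLoopA]
    rw [if_neg (by omega)]
    simp [descM_nil_right]
  | succ j' ihj =>
    intro i rv hi hj
    cases i with
    | zero =>
      rw [solveLoopA]
      rw [if_neg (by omega)]
      simp [descM]
    | succ i' =>
      have hi' : i' < sa.length := by omega
      have hj' : j' < sb.length := by omega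
      rw [solveLoopA]
      rw [if_pos (by constructor <;> [omega; omega])]
      have hga : PySem.List.pyGetD sa ((i' + 1 : Nat) - 1 : Int) 0 = sa[i'] := by
        have : ((i' + 1 : Nat) : Int) - 1 = ((i' : Nat) : Int) := by push_cast; ring
        rw [this, PySem.List.pyGetD_natCast, List.getD_eq_getElem _ _ hi']
      have hgb' : PySem.List.pyGetD sb ((j' + 1 : Nat) - 1 : Int) 0 = sb[j'] := by
        have : ((j' + 1 : Nat) : Int) - 1 = ((j' : Nat) : Int) := by push_cast; ring
        rw [this, PySem.List.pyGetD_natCast, List.getD_eq_getElem _ _ hj']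
      have hta : sa.take (i' + 1) = sa.take i' ++ [sa[i']] := by
        rw [List.take_add_one, List.getElem?_eq_getElem hi']; rfl
      have htb : sb.take (j' + 1) = sb.take j' ++ [sb[j']] := by
        rw [List.take_add_one, List.getElem?_eq_getElem hj']; rfl
      rw [hga, hgb', hta, htb, List.reverse_append, List.reverse_append]
      simp only [List.reverse_singleton, List.singleton_append]
      rw [descM]
      by_cases hc : sb[j'] < sa[i']
      · rw [if_pos hc, if_pos hc]
        have h1 : ((i' + 1 : Nat) : Int) - 1 - 1 = ((i' : Nat) : Int) - 1 := by push_cast; ring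
        have h2 : ((j' + 1 : Nat) : Int) - 1 - 1 = ((j' : Nat) : Int) - 1 := by push_cast; ring
        rw [h1, h2, ihj i' (rv + 1) (by omega) (by omega)]
        omega
      · rw [if_neg hc, if_neg hc]
        have h2 : ((j' + 1 : Nat) : Int) - 1 - 1 = ((j' : Nat) : Int) - 1 := by push_cast; ring
        rw [h2, ihj (i' + 1) rv (by omega) (by omega)]
        rw [hta, List.reverse_append]
        simp

-- ascending reading of goodD: top-k of sa beats bottom-k of sb
def goodAsc (sa sb : List Int) (k : Nat) : Prop :=
  ∀ i < k, sb.getD i 0 < sa.getD (sa.length - k + i) 0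

theorem getD_reverse (l : List Int) (j : Nat) (hj : j < l.length) :
    l.reverse.getD j 0 = l.getD (l.length - 1 - j) 0 := by
  rw [List.getD_eq_getElem _ _ (by simpa using hj), List.getD_eq_getElem _ _ (by omega)]
  rw [List.getElem_reverse]

theorem getD_take (l : List Int) (n i : Nat) (hi : i < n) (hn : n ≤ l.length) :
    (l.take n).getD i 0 = l.getD i 0 := by
  rw [List.getD_eq_getElem _ _ (by simp; omega), List.getD_eq_getElem _ _ (by omega)]
  simp [List.getElem_take]

theorem goodD_iff_goodAsc (sa sb : List Int) (k : Nat) (hk : k ≤ sa.length)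
    (hab : sa.length ≤ sb.length) :
    goodD sa.reverse (sb.take sa.length).reverse k ↔ goodAsc sa sb k := by
  have hlt : (sb.take sa.length).length = sa.length := by simp; omega
  unfold goodD goodAsc
  simp only [List.length_reverse, hlt]
  constructor
  · rintro ⟨-, -, h3⟩ i hi
    have h := h3 (k - 1 - i) (by omega)
    rw [getD_reverse (sb.take sa.length) _ (by rw [hlt]; omega),
        getD_reverse sa _ (by omega)] at h
    rw [hlt] at h
    have e1 : sa.length - 1 - (sa.length - k + (k - 1 - i)) = i := by omega
    have e2 : sa.length - 1 - (k - 1 - i) = sa.length - k + i := by omega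
    rw [e1, e2, getD_take sb sa.length i (by omega) hab] at h
    exact h
  · intro h
    refine ⟨by omega, by omega, ?_⟩
    intro j hj
    have hh := h (k - 1 - j) (by omega)
    rw [getD_reverse (sb.take sa.length) _ (by rw [hlt]; omega),
        getD_reverse sa _ (by omega)]
    rw [hlt]
    have e1 : sa.length - 1 - (sa.length - k + j) = k - 1 - j := by omega
    have e2 : sa.length - 1 - j = sa.length - k + (k - 1 - j) := by omega
    rw [e1, e2, getD_take sb sa.length (k - 1 - j) (by omega) hab]
    exact hh

-- goodAsc is downward closed on an ascending-sorted sa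
theorem goodAsc_mono (sa sb : List Int) (hsa : sa.Pairwise (fun a b => a ≤ b))
    (r k : Nat) (hk : k ≤ r) (hr : r ≤ sa.length) (h : goodAsc sa sb r) :
    goodAsc sa sb k := by
  intro i hi
  have h1 := h i (by omega)
  have h2 : sa.getD (sa.length - r + i) 0 ≤ sa.getD (sa.length - k + i) 0 :=
    getD_mono sa hsa _ _ (by omega) (by omega)
  omega

-- the Bool check of the port coincides with goodAsc (indices in range under k ≤ n ≤ |sb|)
theorem goodB_iff (sa sb : List Int) (k : Nat) (hk : k ≤ sa.length)
    (hab : sa.length ≤ sb.length) :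
    goodB sa sb (sa.length : Int) (k : Int) = true ↔ goodAsc sa sb k := by
  unfold goodB goodAsc
  rw [PySem.List.pyRange_zero_natCast]
  rw [List.all_map, List.all_eq_true]
  constructor
  · intro h i hi
    have := h i (List.mem_range.mpr hi)
    simp only [Function.comp] at this
    rw [PySem.List.pyGetD_natCast] at this
    have e : (sa.length : Int) - (k : Int) + (i : Int) = ((sa.length - k + i : Nat) : Int) := by
      push_cast; omega
    rw [e, PySem.List.pyGetD_natCast] at this
    exact of_decide_eq_true this
  · intro h i hi
    have hi' := List.mem_range.mp hi
    simp only [Function.comp]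
    rw [PySem.List.pyGetD_natCast]
    have e : (sa.length : Int) - (k : Int) + (i : Int) = ((sa.length - k + i : Nat) : Int) := by
      push_cast; omega
    rw [e, PySem.List.pyGetD_natCast]
    exact decide_eq_true (h i hi')

-- the binary search finds the maximal good k
theorem bsLoop_eq (sa sb : List Int) (n : Int) (r : Nat)
    (hdown : ∀ k : Nat, k ≤ r → goodB sa sb n (k : Int) = true)
    (hmax : ∀ k : Nat, (k : Int) ≤ n → goodB sa sb n (k : Int) = true → k ≤ r) :
    ∀ lo hi : Int, 0 ≤ lo → lo ≤ (r : Int) → (r : Int) ≤ hi → hi ≤ n →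
      bsLoop sa sb n lo hi = (r : Int) := by
  intro lo hi
  induction lo, hi using bsLoop.induct sa sb n with
  | case1 lo hi h hg ih =>
    intro h0 hlo hhi hn
    obtain ⟨hm1, hm2⟩ := pvMid_bounds lo hi h
    rw [bsLoop, dif_pos h, if_pos hg]
    set mid := PySem.Int.floordiv (lo + hi + 1) 2 with hmid
    have hmn : 0 ≤ mid := by omega
    have hcast : ((mid.toNat : Nat) : Int) = mid := Int.toNat_of_nonneg hmn
    have : mid.toNat ≤ r := by
      apply hmax mid.toNat (by omega)
      rw [hcast]; exact hg
    exact ih hmn (by omega) hhi hn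
  | case2 lo hi h hg ih =>
    intro h0 hlo hhi hn
    obtain ⟨hm1, hm2⟩ := pvMid_bounds lo hi h
    rw [bsLoop, dif_pos h, if_neg (by simpa using hg)]
    set mid := PySem.Int.floordiv (lo + hi + 1) 2 with hmid
    have hrm : (r : Int) < mid := by
      by_contra hc
      have hgm : goodB sa sb n mid = true := by
        have h2 : goodB sa sb n ((mid.toNat : Nat) : Int) = true := hdown _ (by omega)
        rwa [Int.toNat_of_nonneg (by omega)] at h2
      exact absurd hgm (by simpa using hg)
    exact ih h0 hlo (by omega) (by omega)
  | case3 lo hi h =>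
    intro h0 hlo hhi hn
    rw [bsLoop, dif_neg h]
    omega

-- ===== VERDICT (by name: the statement is the Claim_ definition above) =====
theorem solve_spec : Claim_equal_solve := by
  intro a b _ hpre
  unfold Spec_solve solve solve_alt
  simp only []
  set sa := PySem.List.sorted a (fun x => x) false with hsa
  set sb := PySem.List.sorted b (fun x => x) false with hsb
  have hla : sa.length = a.length := PySem.List.length_sorted a (fun x => x) false
  have hlb : sb.length = b.length := PySem.List.length_sorted b (fun x => x) false
  have hpre' : a.length ≤ b.length := hpre
  have hab : sa.length ≤ sb.length := by omega
  have hsorted_a : sa.Pairwise (fun x y => x ≤ y) := PySem.List.sorted_pairwise a (fun x => x)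
  have hsorted_b : sb.Pairwise (fun x y => x ≤ y) := PySem.List.sorted_pairwise b (fun x => x)
  -- A side: descending greedy over the reversed lists
  rw [solveLoopA_eq sa sb a.length a.length 0 (by omega) (by omega)]
  rw [← hla, List.take_length]
  set tb := sb.take sa.length with htb
  set r := descN sa.reverse tb.reverse with hr
  rw [descM_eq_descN, ← hr]
  -- descending sortedness of the reverses
  have hda : sa.reverse.Pairwise (fun x y => y ≤ x) := by
    rw [List.pairwise_reverse]; exact hsorted_a
  have hdb : tb.reverse.Pairwise (fun x y => y ≤ x) := by
    rw [List.pairwise_reverse]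
    exact hsorted_b.sublist (List.take_sublist _ _)
  have hgoodD := descN_goodD sa.reverse tb.reverse hda hdb
  have hrn : r ≤ sa.length := by
    have := hgoodD.1; simpa using this
  have hgoodAscR : goodAsc sa sb r :=
    (goodD_iff_goodAsc sa sb r hrn hab).mp hgoodD
  -- B side: the binary search returns r
  have hdown : ∀ k : Nat, k ≤ r → goodB sa sb (sa.length : Int) (k : Int) = true := by
    intro k hk
    exact (goodB_iff sa sb k (by omega) hab).mpr
      (goodAsc_mono sa sb hsorted_a r k hk hrn hgoodAscR)
  have hmax : ∀ k : Nat, (k : Int) ≤ (sa.length : Int) →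
      goodB sa sb (sa.length : Int) (k : Int) = true → k ≤ r := by
    intro k hkn hgk
    have hk : k ≤ sa.length := by exact_mod_cast hkn
    have := (goodB_iff sa sb k hk hab).mp hgk
    exact descN_max sa.reverse tb.reverse hda hdb k
      ((goodD_iff_goodAsc sa sb k hk hab).mpr this)
  have := bsLoop_eq sa sb (sa.length : Int) r hdown hmax 0 (sa.length : Int)
    (by omega) (by exact_mod_cast Nat.zero_le r) (by exact_mod_cast hrn) (le_refl _)
  rw [this]
  omega
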